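-- pv_equiv track=rewrite | github.com/Zabolekar/budivelnyk | compile.py | fill_jump_tables
-- ===== SOURCE A (Python) =====
-- def fill_jump_tables(bf_code: str) -> tuple[dict[int, int], dict[int, int]]:
--     forward_jumps = {}
--     backward_jumps = {}
--     stack = []
--     for i, c in enumerate(bf_code):
--         if c == '[':
--             stack.append(i)
--         elif c == ']':
--             j = stack.pop()
--             forward_jumps[j] = i
--             backward_jumps[i] = j
--     return forward_jumps, backward_jumps
-- ===== SOURCE B (Python) =====
-- def fill_jump_tables(bf_code: str) -> tuple[dict[int, int], dict[int, int]]: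
--     # Stackless matcher: for each ']' scan backward with a balance counter for
--     # the nearest unmatched '['; an unmatched ']' is simply skipped.
--     forward_jumps = {}
--     backward_jumps = {}
--     for i, c in enumerate(bf_code):
--         if c == ']':
--             match = None
--             bal = 0
--             for k in range(i - 1, -1, -1):
--                 d = bf_code[k]
--                 if d == ']':
--                     bal += 1
--                 elif d == '[':
--                     if bal == 0:
--                         match = k
--                         break
--                     bal -= 1
--             if match is not None:
--                 forward_jumps[match] = i
--                 backward_jumps[i] = match
--     return forward_jumps, backward_jumps
-- ===== Notes on version B (the rewrite author's own statement) =====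
-- stated objective: alternative
-- what changed: Replaces the stack-based single pass by a stackless brute-force matcher: for each ']' it scans backward with a balance counter to find the nearest unmatched '[', skipping an unmatched ']' (outside Pre_, where A raises IndexError) instead of popping a stack; trades the O(n) stack pass for an O(n^2) scan.
-- outside the precondition, e.g. on fill_jump_tables(']'): A raises IndexError, B returns ({}, {})
import Mathlib
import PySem

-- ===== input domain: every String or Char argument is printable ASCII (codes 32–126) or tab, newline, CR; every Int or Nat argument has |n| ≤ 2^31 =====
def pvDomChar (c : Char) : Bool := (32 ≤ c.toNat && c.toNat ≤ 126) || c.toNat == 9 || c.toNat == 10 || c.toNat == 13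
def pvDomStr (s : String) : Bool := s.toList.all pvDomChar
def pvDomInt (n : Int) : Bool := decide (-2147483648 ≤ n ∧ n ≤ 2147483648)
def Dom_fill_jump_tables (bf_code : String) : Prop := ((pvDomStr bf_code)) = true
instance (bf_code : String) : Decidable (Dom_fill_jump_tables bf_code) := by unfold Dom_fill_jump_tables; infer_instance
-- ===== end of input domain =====

-- B replaces A's stack pass by a stackless matcher: for each ']' it scans backward with a
-- balance counter for the nearest unmatched '[' (O(n^2) vs O(n)); where A raises IndexError
-- on a stray ']', B skips it and returns the tables of the pairs that do match.


-- ===== PORT A =====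
-- loop over enumerate(bf_code) with state (forward_jumps, backward_jumps, stack);
-- stack.pop() on an empty stack is PySem.List.pop? = none (Python's IndexError), excluded by Pre_.
def fjtLoopA : List (Int × Char) → PySem.Dict Int Int → PySem.Dict Int Int → List Int →
    Option (PySem.Dict Int Int × PySem.Dict Int Int)
  | [], fwd, bwd, _ => some (fwd, bwd)
  | (i, c) :: rest, fwd, bwd, stack =>
    if c = '[' then fjtLoopA rest fwd bwd (stack ++ [i])
    else if c = ']' then
      match PySem.List.pop? stack with
      | none => none
      | some (j, stack') => fjtLoopA rest (fwd.insert j i) (bwd.insert i j) stack'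
    else fjtLoopA rest fwd bwd stack

def fill_jump_tables (bf_code : String) : (List (Int × Int)) × (List (Int × Int)) :=
  match fjtLoopA (PySem.List.enumerate bf_code.toList 0) PySem.Dict.empty PySem.Dict.empty [] with
  | some (fwd, bwd) => (fwd.items, bwd.items)
  | none => ([], [])   -- unreachable under Pre_ (Python raises IndexError here)

-- ===== PORT B =====
-- inner scan: 'for k in range(i-1,-1,-1)' walks the already-seen characters right-to-left,
-- which is exactly the reversed enumerated prefix carried by the outer loop.
def fjtFind : Int → List (Int × Char) → Option Int
  | _, [] => none
  | bal, (k, d) :: rest =>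
    if d = ']' then fjtFind (bal + 1) rest
    else if d = '[' then (if bal = 0 then some k else fjtFind (bal - 1) rest)
    else fjtFind bal rest

def fjtLoopB : List (Int × Char) → List (Int × Char) → PySem.Dict Int Int → PySem.Dict Int Int →
    PySem.Dict Int Int × PySem.Dict Int Int
  | [], _, fwd, bwd => (fwd, bwd)
  | (i, c) :: rest, rseen, fwd, bwd =>
    if c = ']' then
      match fjtFind 0 rseen with
      | some j => fjtLoopB rest ((i, c) :: rseen) (fwd.insert j i) (bwd.insert i j)
      | none => fjtLoopB rest ((i, c) :: rseen) fwd bwd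
    else fjtLoopB rest ((i, c) :: rseen) fwd bwd

def fill_jump_tables_alt (bf_code : String) : (List (Int × Int)) × (List (Int × Int)) :=
  match fjtLoopB (PySem.List.enumerate bf_code.toList 0) [] PySem.Dict.empty PySem.Dict.empty with
  | (fwd, bwd) => (fwd.items, bwd.items)

-- ===== PRECONDITION & SPEC =====
-- Pre_ excludes exactly the inputs on which Python A raises IndexError:
-- some prefix contains more ']' than '['.
def Pre_fill_jump_tables (bf_code : String) : Prop :=
  ∀ n ∈ List.range (bf_code.toList.length + 1),
    (bf_code.toList.take n).count ']' ≤ (bf_code.toList.take n).count '['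
instance (bf_code : String) : Decidable (Pre_fill_jump_tables bf_code) := by
  unfold Pre_fill_jump_tables; infer_instance
def pvWitness_fill_jump_tables : String := "[+[.]-]x"

def Spec_fill_jump_tables (bf_code : String) (out : (List (Int × Int)) × (List (Int × Int))) : Prop := out = fill_jump_tables_alt bf_code
instance (bf_code : String) (out : (List (Int × Int)) × (List (Int × Int))) : Decidable (Spec_fill_jump_tables bf_code out) := by unfold Spec_fill_jump_tables; infer_instance


-- ===== CLAIM (what is proved, stated in full; the proofs are below) =====
def Claim_equal_fill_jump_tables : Prop := ∀ (bf_code : String), Dom_fill_jump_tables bf_code → Pre_fill_jump_tables bf_code → Spec_fill_jump_tables bf_code (fill_jump_tables bf_code)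

-- ===== LEMMAS AND PROOFS =====

-- B's backward balance scan over the reversed seen prefix reads off A's stack from the top:
-- fjtFind k rseen is the (k+1)-th unmatched '[' from the right, i.e. stack.reverse[k]?.
-- Under that invariant the two loops produce the same dicts whenever A does not empty-pop.
theorem fjtLoop_rel (l : List (Int × Char)) :
    ∀ (stack : List Int) (rseen : List (Int × Char))
      (fwd bwd : PySem.Dict Int Int) (out : PySem.Dict Int Int × PySem.Dict Int Int),
      (∀ k : Nat, fjtFind (k : Int) rseen = stack.reverse[k]?) →
      fjtLoopA l fwd bwd stack = some out →
      fjtLoopB l rseen fwd bwd = out := by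
  induction l with
  | nil =>
    intro stack rseen fwd bwd out _ hA
    simp only [fjtLoopA, Option.some.injEq] at hA
    simpa [fjtLoopB] using hA
  | cons p rest ih =>
    intro stack rseen fwd bwd out H hA
    obtain ⟨i, c⟩ := p
    by_cases h1 : c = '['
    · subst h1
      rw [fjtLoopA, if_pos rfl] at hA
      rw [fjtLoopB, if_neg (by decide)]
      refine ih _ _ _ _ _ ?_ hA
      intro k
      cases k with
      | zero => simp [fjtFind]
      | succ k' =>
        rw [show ((k' + 1 : Nat) : Int) = (k' : Int) + 1 by push_cast; ring]
        rw [fjtFind]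
        rw [if_neg (by decide), if_pos rfl, if_neg (by omega)]
        rw [show ((k' : Int) + 1 - 1) = ((k' : Nat) : Int) by ring]
        simp [H k', List.reverse_append]
    · by_cases h2 : c = ']'
      · subst h2
        rw [fjtLoopA, if_neg (by decide), if_pos rfl] at hA
        rcases stack.eq_nil_or_concat with rfl | ⟨ys, y, rfl⟩
        · rw [show PySem.List.pop? ([] : List Int) = none from rfl] at hA
          exact absurd hA (by simp)
        · simp only [List.concat_eq_append] at hA H
          rw [PySem.List.pop?_last] at hA
          have h0 := H 0
          rw [show ((0 : Nat) : Int) = 0 by rfl] at h0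
          simp [List.reverse_append] at h0
          rw [fjtLoopB, if_pos rfl, h0]
          refine ih _ _ _ _ _ ?_ hA
          intro k
          rw [fjtFind, if_pos rfl]
          rw [show ((k : Nat) : Int) + 1 = ((k + 1 : Nat) : Int) by push_cast; ring, H (k + 1)]
          simp [List.reverse_append]
      · rw [fjtLoopA, if_neg h1, if_neg h2] at hA
        rw [fjtLoopB, if_neg h2]
        refine ih _ _ _ _ _ ?_ hA
        intro k
        rw [fjtFind, if_neg h2, if_neg h1]
        exact H k

-- A's loop returns (no empty pop) as long as every prefix of the remaining characters
-- closes at most stack.length more brackets than it opens.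
theorem fjtLoopA_total (l : List (Int × Char)) :
    ∀ (stack : List Int) (fwd bwd : PySem.Dict Int Int),
      (∀ n : Nat, ((l.map (·.2)).take n).count ']' ≤ stack.length + ((l.map (·.2)).take n).count '[') →
      (fjtLoopA l fwd bwd stack).isSome := by
  induction l with
  | nil => intro stack fwd bwd _; simp [fjtLoopA]
  | cons p rest ih =>
    intro stack fwd bwd Hc
    obtain ⟨i, c⟩ := p
    by_cases h1 : c = '['
    · subst h1
      rw [fjtLoopA, if_pos rfl]
      refine ih _ _ _ ?_
      intro n
      have := Hc (n + 1)
      simp at this ⊢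
      omega
    · by_cases h2 : c = ']'
      · subst h2
        rw [fjtLoopA, if_neg (by decide), if_pos rfl]
        have h1' := Hc 1
        simp at h1'
        rcases stack.eq_nil_or_concat with rfl | ⟨ys, y, rfl⟩
        · simp at h1'
        · simp only [List.concat_eq_append]
          rw [PySem.List.pop?_last]
          refine ih _ _ _ ?_
          intro n
          have := Hc (n + 1)
          simp at this ⊢
          omega
      · rw [fjtLoopA, if_neg h1, if_neg h2]
        refine ih _ _ _ ?_
        intro n
        have := Hc (n + 1)
        simp [h1, h2] at this ⊢
        omega

-- ===== VERDICT (by name: the statement is the Claim_ definition above) =====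
theorem fill_jump_tables_spec : Claim_equal_fill_jump_tables := by
  intro bf_code _ hpre
  unfold Spec_fill_jump_tables fill_jump_tables fill_jump_tables_alt
  have hcount : ∀ n : Nat, (bf_code.toList.take n).count ']' ≤ (bf_code.toList.take n).count '[' := by
    intro n
    by_cases hn : n ≤ bf_code.toList.length
    · exact hpre n (List.mem_range.mpr (by omega))
    · rw [List.take_of_length_le (by omega)]
      have := hpre bf_code.toList.length (List.mem_range.mpr (by omega))
      rwa [List.take_length] at this
  have hmap : (PySem.List.enumerate bf_code.toList 0).map (·.2) = bf_code.toList :=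
    PySem.List.map_snd_enumerate bf_code.toList 0
  have htot := fjtLoopA_total (PySem.List.enumerate bf_code.toList 0) [] PySem.Dict.empty PySem.Dict.empty
    (by intro n; rw [hmap]; simpa using hcount n)
  obtain ⟨out, hout⟩ := Option.isSome_iff_exists.mp htot
  have hB := fjtLoop_rel (PySem.List.enumerate bf_code.toList 0) [] [] PySem.Dict.empty PySem.Dict.empty out
    (by intro k; simp [fjtFind]) hout
  rw [hout, hB]
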